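-- pv_equiv track=rewrite | github.com/egtaishwaryapattar/AdventOfCode24 | Day7/Day7.py | is_equation_valid
-- ===== SOURCE A (Python) =====
-- import math
--
-- def is_equation_valid(target, nums):
--     len_nums = len(nums)
--     sum_of_nums = sum(nums)
--     product_of_nums = math.prod(nums)
--
--     # test if combination of multiplication and addition is needed
--     arr = []
--     for i in range(len_nums):
--         if i == 0:
--             arr.append(nums[i])
--         else:
--             temp = arr.copy()
--             arr.clear()
--             for val in temp:
--                 # the array size keeps increasing with each calculation - each time creating two branches - one for addition one for multiplication
--                 arr.append(val + nums[i])
--                 arr.append(val * nums[i])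
--
--     return target in arr
-- ===== SOURCE B (Python) =====
-- def is_equation_valid(target, nums):
--     # Backward pruned search: walk the numbers from the right, undoing the last
--     # operation (subtract, or divide only when exactly divisible).
--     def reach(t, rev):
--         n = rev[0]
--         rest = rev[1:]
--         if not rest:
--             return t == n
--         if reach(t - n, rest):
--             return True
--         if n == 0:
--             return t == 0
--         return t % n == 0 and reach(t // n, rest)
--
--     if not nums:
--         return False
--     return reach(target, nums[::-1])
-- ===== Notes on version B (the rewrite author's own statement) =====
-- stated objective: faster
-- what changed: A enumerates every +/* combination value breadth-first (2^(n-1) values kept in memory); B searches backward from the target, undoing the last operation (subtract always, divide only when the number is nonzero and divides the target), which prunes whole subtrees.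
import Mathlib
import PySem

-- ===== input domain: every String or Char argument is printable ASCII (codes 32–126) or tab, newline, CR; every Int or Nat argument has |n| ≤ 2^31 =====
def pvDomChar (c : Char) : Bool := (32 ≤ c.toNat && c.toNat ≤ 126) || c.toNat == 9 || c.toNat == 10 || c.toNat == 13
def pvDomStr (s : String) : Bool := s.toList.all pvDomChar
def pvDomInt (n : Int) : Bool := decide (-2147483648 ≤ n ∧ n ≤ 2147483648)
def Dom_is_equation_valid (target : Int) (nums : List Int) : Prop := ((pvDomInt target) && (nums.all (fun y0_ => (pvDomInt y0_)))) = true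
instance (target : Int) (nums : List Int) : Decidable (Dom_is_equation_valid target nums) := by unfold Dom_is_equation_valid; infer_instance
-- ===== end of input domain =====

-- B replaces A's breadth-first enumeration of all +/* combination values by a
-- backward pruned recursion from the target (undo the last op: subtract, or
-- divide only when exactly divisible); same return value, measurably faster.

-- ===== PORT A =====
def is_equation_valid (target : Int) (nums : List Int) : Bool :=
  let len_nums : Int := nums.length
  let _sum_of_nums : Int := nums.sum          -- sum(nums) (unused, kept as in A)
  let _product_of_nums : Int := nums.prod     -- math.prod(nums) (unused, kept as in A)
  let arr : List Int :=
    (PySem.List.pyRange 0 len_nums 1).foldl (fun arr i =>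
      if i = 0 then
        arr ++ [PySem.List.pyGetD nums i 0]   -- i in range(len), so in range
      else
        let temp := arr
        -- arr.clear(); for val in temp: arr.append(val + nums[i]); arr.append(val * nums[i])
        temp.foldl (fun arr val =>
          arr ++ [val + PySem.List.pyGetD nums i 0, val * PySem.List.pyGetD nums i 0]) []
    ) []
  arr.contains target

-- ===== PORT B =====
def reachAlt : Int → List Int → Bool
  | _, [] => false              -- unreachable: called on a nonempty reversed list
  | t, n :: rest =>
    if rest = [] then t == n
    else if reachAlt (t - n) rest then true
    else if n = 0 then t == 0
    else PySem.Int.mod t n == 0 && reachAlt (PySem.Int.floordiv t n) rest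

def is_equation_valid_alt (target : Int) (nums : List Int) : Bool :=
  if nums = [] then false
  else reachAlt target nums.reverse

-- ===== PRECONDITION & SPEC =====
def Spec_is_equation_valid (target : Int) (nums : List Int) (out : Bool) : Prop := out = is_equation_valid_alt target nums
instance (target : Int) (nums : List Int) (out : Bool) : Decidable (Spec_is_equation_valid target nums out) := by unfold Spec_is_equation_valid; infer_instance

-- ===== CLAIM (what is proved, stated in full; the proofs are below) =====
def Claim_equal_is_equation_valid : Prop := ∀ (target : Int) (nums : List Int), Dom_is_equation_valid target nums → Spec_is_equation_valid target nums (is_equation_valid target nums)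

-- ===== LEMMAS AND PROOFS =====

/-- One breadth-first layer of A's search. -/
def stepA (S : List Int) (n : Int) : List Int := S.flatMap (fun v => [v + n, v * n])

lemma foldl_append_pair (n : Int) (l acc : List Int) :
    l.foldl (fun arr v => arr ++ [v + n, v * n]) acc = acc ++ stepA l n := by
  induction l generalizing acc with
  | nil => simp [stepA]
  | cons v vs ih => simp [stepA, List.foldl_cons, ih, List.flatMap_cons]

lemma stepA_ne_nil {S : List Int} (h : S ≠ []) (n : Int) : stepA S n ≠ [] := by
  cases S with
  | nil => exact absurd rfl h
  | cons v vs => simp [stepA]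

lemma foldl_stepA_ne_nil (rest : List Int) {init : List Int} (h : init ≠ []) :
    rest.foldl stepA init ≠ [] := by
  induction rest generalizing init with
  | nil => exact h
  | cons n ns ih => exact ih (stepA_ne_nil h n)

/-- A's loop over range(len) equals a structural fold of stepA, from index a ≥ 1 on. -/
lemma tail_fold (nums : List Int) (a : Nat) (ha : 1 ≤ a) (init : List Int) :
    (PySem.List.pyRange (a : Int) (nums.length : Int) 1).foldl (fun arr i =>
      if i = 0 then
        arr ++ [PySem.List.pyGetD nums i 0]
      else
        List.foldl (fun arr val =>
          arr ++ [val + PySem.List.pyGetD nums i 0, val * PySem.List.pyGetD nums i 0]) [] arr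
    ) init
    = (nums.drop a).foldl stepA init := by
  by_cases h : a < nums.length
  · rw [PySem.List.pyRange_one_cons (by exact_mod_cast h)]
    have hz : (a : Int) ≠ 0 := by omega
    have hget : PySem.List.pyGetD nums (a : Int) 0 = nums[a] := by
      rw [PySem.List.pyGetD_natCast]; exact List.getD_eq_getElem _ _ h
    have hdrop : nums.drop a = nums[a] :: nums.drop (a + 1) :=
      List.drop_eq_getElem_cons h
    rw [List.foldl_cons, if_neg hz, hget]
    have hcast : (a : Int) + 1 = ((a + 1 : Nat) : Int) := by push_cast; ring
    rw [hcast, tail_fold nums (a + 1) (by omega), hdrop, List.foldl_cons]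
    congr 1
    simpa [stepA] using foldl_append_pair nums[a] init []
  · rw [PySem.List.pyRange_one_eq_nil (by exact_mod_cast Nat.le_of_not_lt h)]
    rw [List.drop_eq_nil_of_le (Nat.le_of_not_lt h)]
    rfl
termination_by nums.length - a

/-- membership in one layer -/
lemma mem_stepA {S : List Int} {n t : Int} :
    t ∈ stepA S n ↔ ∃ v ∈ S, v + n = t ∨ v * n = t := by
  simp only [stepA, List.mem_flatMap, List.mem_cons]
  constructor
  · rintro ⟨v, hv, h⟩; exact ⟨v, hv, by tauto⟩
  · rintro ⟨v, hv, h⟩; exact ⟨v, hv, by tauto⟩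

lemma mul_eq_iff (n t v : Int) (hn : n ≠ 0) :
    v * n = t ↔ (PySem.Int.mod t n = 0 ∧ v = PySem.Int.floordiv t n) := by
  rw [PySem.Int.mod_eq_zero_iff_dvd]
  constructor
  · rintro rfl
    refine ⟨⟨v, mul_comm v n⟩, ?_⟩
    simp [PySem.Int.floordiv, Int.mul_fdiv_cancel v hn]
  · rintro ⟨⟨c, rfl⟩, rfl⟩
    simp [PySem.Int.floordiv, Int.mul_fdiv_cancel_left c hn, Int.mul_comm]

lemma step_char (S : List Int) (hS : S ≠ []) (n t : Int) :
    t ∈ stepA S n ↔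
      ((t - n) ∈ S ∨
        (if n = 0 then t = 0
         else PySem.Int.mod t n = 0 ∧ PySem.Int.floordiv t n ∈ S)) := by
  rw [mem_stepA]
  have hadd : (∃ v ∈ S, v + n = t) ↔ (t - n) ∈ S := by
    constructor
    · rintro ⟨v, hv, rfl⟩; simpa using hv
    · intro h; exact ⟨t - n, h, by ring⟩
  by_cases hz : n = 0
  · subst hz
    rw [if_pos rfl]
    constructor
    · rintro ⟨v, hv, h | h⟩
      · left; exact hadd.mp ⟨v, hv, h⟩
      · right; simp at h; omega
    · rintro (h | h)
      · obtain ⟨v, hv, he⟩ := hadd.mpr h; exact ⟨v, hv, Or.inl he⟩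
      · obtain ⟨v, hv⟩ := List.exists_mem_of_ne_nil S hS
        exact ⟨v, hv, Or.inr (by simp [h])⟩
  · simp only [if_neg hz]
    constructor
    · rintro ⟨v, hv, h | h⟩
      · left; exact hadd.mp ⟨v, hv, h⟩
      · obtain ⟨h1, h2⟩ := (mul_eq_iff n t v hz).mp h
        exact Or.inr ⟨h1, h2 ▸ hv⟩
    · rintro (h | ⟨h1, h2⟩)
      · obtain ⟨v, hv, he⟩ := hadd.mpr h; exact ⟨v, hv, Or.inl he⟩
      · exact ⟨_, h2, Or.inr ((mul_eq_iff n t _ hz).mpr ⟨h1, rfl⟩)⟩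

lemma reachAlt_cons (t n : Int) (rest : List Int) (h : rest ≠ []) :
    reachAlt t (n :: rest) = true ↔
      (reachAlt (t - n) rest = true ∨
        (if n = 0 then t = 0
         else PySem.Int.mod t n = 0 ∧ reachAlt (PySem.Int.floordiv t n) rest = true)) := by
  rw [reachAlt, if_neg h]
  by_cases hz : n = 0 <;> split_ifs <;> simp_all

/-- the heart: layered membership equals the backward recursion on the reverse. -/
lemma main_lemma (rest : List Int) (x t : Int) :
    (rest.foldl stepA [x]).contains t = reachAlt t ((x :: rest).reverse) := by
  induction rest using List.reverseRecOn generalizing t with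
  | nil =>
      apply Bool.eq_iff_iff.mpr
      rw [List.foldl_nil, List.reverse_singleton, reachAlt, if_pos rfl]
      simp
  | append_singleton rs n ih =>
      rw [List.foldl_append, List.foldl_cons, List.foldl_nil]
      have hrev : (x :: (rs ++ [n])).reverse = n :: (x :: rs).reverse := by simp
      rw [hrev]
      have hSne : rs.foldl stepA [x] ≠ [] := foldl_stepA_ne_nil rs (by simp)
      have hrne : (x :: rs).reverse ≠ [] := by simp
      apply Bool.eq_iff_iff.mpr
      rw [List.contains_iff_mem, step_char _ hSne, reachAlt_cons _ _ _ hrne]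
      have bridge : ∀ a : Int, a ∈ rs.foldl stepA [x] ↔ reachAlt a ((x :: rs).reverse) = true := by
        intro a
        rw [← List.contains_iff_mem, ih a]
      by_cases hz : n = 0 <;> simp [hz, bridge]

lemma A_cons (target x : Int) (rest : List Int) :
    is_equation_valid target (x :: rest) = (rest.foldl stepA [x]).contains target := by
  simp only [is_equation_valid]
  have h0 : (0 : Int) < ((x :: rest).length : Int) := by
    exact_mod_cast Nat.succ_pos rest.length
  rw [PySem.List.pyRange_one_cons h0, List.foldl_cons]
  simp only [PySem.List.pyGetD_zero_cons, List.nil_append, if_true]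
  rw [show (0 : Int) + 1 = ((1 : Nat) : Int) by norm_num]
  rw [tail_fold (x :: rest) 1 le_rfl [x]]
  simp

-- ===== VERDICT (by name: the statement is the Claim_ definition above) =====
theorem is_equation_valid_spec : Claim_equal_is_equation_valid := by
  intro target nums _
  unfold Spec_is_equation_valid
  cases nums with
  | nil =>
      simp [is_equation_valid, is_equation_valid_alt]
  | cons x rest =>
      rw [A_cons, is_equation_valid_alt, if_neg (by simp : x :: rest ≠ [])]
      exact main_lemma rest x target
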